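-- pv_equiv track=rewrite | github.com/birenyin/grid_video_agent | 电网视频生成助手/app/services/storyboard_prompt_engine.py | _allocate_durations
-- ===== SOURCE A (Python) =====
-- def _allocate_durations(shot_count: int, target_duration_seconds: int) -> list[int]:
--     min_total = shot_count * 3
--     max_total = shot_count * 6
--     target = max(min_total, min(max_total, target_duration_seconds))
--     base = max(3, min(6, round(target / shot_count)))
--     durations = [base for _ in range(shot_count)]
--     current = sum(durations)
--
--     while current < target:
--         changed = False
--         for index in range(shot_count):
--             if durations[index] < 6 and current < target:
--                 durations[index] += 1
--                 current += 1
--                 changed = True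
--         if not changed:
--             break
--
--     while current > target:
--         changed = False
--         for index in range(shot_count):
--             if durations[index] > 3 and current > target:
--                 durations[index] -= 1
--                 current -= 1
--                 changed = True
--         if not changed:
--             break
--     return durations
-- ===== SOURCE B (Python) =====
-- def _allocate_durations(shot_count: int, target_duration_seconds: int) -> list[int]:
--     min_total = shot_count * 3
--     max_total = shot_count * 6
--     target = max(min_total, min(max_total, target_duration_seconds))
--     base = max(3, min(6, round(target / shot_count)))
--     durations = [base] * shot_count
--     delta = target - base * shot_count
--     step = 1 if delta > 0 else -1
--     for i in range(min(abs(delta), len(durations))):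
--         durations[i] += step
--     return durations
-- ===== Notes on version B (the rewrite author's own statement) =====
-- stated objective: faster
-- what changed: Replaces A's two repeat-until-stable while loops (each sweeping the whole list and re-checking per-element caps and the running sum) with a single arithmetic delta = target - base*shot_count computed once, followed by one bounded pass adding/subtracting 1 on the first |delta| elements; caps need no checking since round() keeps |delta| within shot_count/2.
import Mathlib
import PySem

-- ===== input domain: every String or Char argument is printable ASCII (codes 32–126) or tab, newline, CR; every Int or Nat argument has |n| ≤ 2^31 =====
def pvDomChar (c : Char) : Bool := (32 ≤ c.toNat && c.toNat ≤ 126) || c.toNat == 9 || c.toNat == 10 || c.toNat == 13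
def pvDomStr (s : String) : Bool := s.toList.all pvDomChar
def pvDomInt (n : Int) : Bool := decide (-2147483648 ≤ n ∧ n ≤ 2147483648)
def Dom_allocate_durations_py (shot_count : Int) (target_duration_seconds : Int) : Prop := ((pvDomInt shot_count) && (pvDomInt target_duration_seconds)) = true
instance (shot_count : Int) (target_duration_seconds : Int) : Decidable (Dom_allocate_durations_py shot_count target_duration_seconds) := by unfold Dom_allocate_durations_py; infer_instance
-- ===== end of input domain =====

-- B replaces A's two repeat-until-stable redistribution while-loops by a single arithmetic
-- delta computed once and one bounded pass that bumps the first |delta| elements (simpler).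

-- ===== PORT A =====
-- round(n/d) for a Python float division n/d: exact integer round-half-even.
-- Hand-ported (PySem has no float round). Exact on this file's domain: |n| ≤ 6·2^31, so the
-- float quotient's error (< 2^-50 relatively, ratio in [3,6]) is far below the distance
-- 1/(2|d|) ≥ 2^-33 to the nearest half-integer boundary, and exact half-integers are
-- represented and divided exactly; hence float round-half-even = integer round-half-even.
def roundHalfEvenPos (n d : Int) : Int :=
  if 2 * PySem.Int.mod n d < d then PySem.Int.floordiv n d
  else if d < 2 * PySem.Int.mod n d then PySem.Int.floordiv n d + 1
  else if PySem.Int.mod (PySem.Int.floordiv n d) 2 = 0 then PySem.Int.floordiv n d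
  else PySem.Int.floordiv n d + 1

def pyRoundDiv (n d : Int) : Int :=
  if d < 0 then roundHalfEvenPos (-n) (-d) else roundHalfEvenPos n d

-- one execution of A's inner 'for index in range(shot_count)' of the first (adding) while
-- loop: left-to-right over durations (index i visits the i-th element), carrying
-- (durations, current, changed); structural walk = the same traversal and updates.
def passAdd (t : Int) : List Int → Int → Bool → List Int × Int × Bool
  | [], cur, ch => ([], cur, ch)
  | d :: rest, cur, ch =>
    if d < 6 ∧ cur < t then
      let p := passAdd t rest (cur + 1) true
      ((d + 1) :: p.1, p.2)
    else
      let p := passAdd t rest cur ch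
      (d :: p.1, p.2)

-- same for the second (subtracting) while loop's body
def passSub (t : Int) : List Int → Int → Bool → List Int × Int × Bool
  | [], cur, ch => ([], cur, ch)
  | d :: rest, cur, ch =>
    if 3 < d ∧ t < cur then
      let p := passSub t rest (cur - 1) true
      ((d - 1) :: p.1, p.2)
    else
      let p := passSub t rest cur ch
      (d :: p.1, p.2)

-- termination facts for the while loops (cited by decreasing_by below)
theorem passAdd_cur_le (t : Int) : ∀ (ds : List Int) (cur : Int) (ch : Bool),
    cur ≤ (passAdd t ds cur ch).2.1 := by
  intro ds
  induction ds with
  | nil => intro cur _; simp [passAdd]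
  | cons d rest ih =>
    intro cur ch
    simp only [passAdd]
    split
    · exact le_trans (by omega) (ih (cur + 1) true)
    · exact ih cur ch

theorem passAdd_changed_lt (t : Int) : ∀ (ds : List Int) (cur : Int),
    (passAdd t ds cur false).2.2 = true → cur < (passAdd t ds cur false).2.1 := by
  intro ds
  induction ds with
  | nil => intro cur h; simp [passAdd] at h
  | cons d rest ih =>
    intro cur h
    by_cases hc : d < 6 ∧ cur < t
    · simp only [passAdd, if_pos hc]
      exact lt_of_lt_of_le (by omega) (passAdd_cur_le t rest (cur + 1) true)
    · simp only [passAdd, if_neg hc] at h ⊢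
      exact ih cur h

theorem passSub_cur_ge (t : Int) : ∀ (ds : List Int) (cur : Int) (ch : Bool),
    (passSub t ds cur ch).2.1 ≤ cur := by
  intro ds
  induction ds with
  | nil => intro cur _; simp [passSub]
  | cons d rest ih =>
    intro cur ch
    simp only [passSub]
    split
    · exact le_trans (ih (cur - 1) true) (by omega)
    · exact ih cur ch

theorem passSub_changed_lt (t : Int) : ∀ (ds : List Int) (cur : Int),
    (passSub t ds cur false).2.2 = true → (passSub t ds cur false).2.1 < cur := by
  intro ds
  induction ds with
  | nil => intro cur h; simp [passSub] at h
  | cons d rest ih =>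
    intro cur h
    by_cases hc : 3 < d ∧ t < cur
    · simp only [passSub, if_pos hc]
      exact lt_of_le_of_lt (passSub_cur_ge t rest (cur - 1) true) (by omega)
    · simp only [passSub, if_neg hc] at h ⊢
      exact ih cur h

-- A's first while loop: 'while current < target: run a pass; if not changed: break'
def whileAdd (t : Int) (ds : List Int) (cur : Int) : List Int × Int :=
  if _h : cur < t then
    let p := passAdd t ds cur false
    if hc : p.2.2 = true then whileAdd t p.1 p.2.1
    else (p.1, p.2.1)
  else (ds, cur)
termination_by (t - cur).toNat
decreasing_by
  have := passAdd_changed_lt t ds cur hc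
  omega

-- A's second while loop
def whileSub (t : Int) (ds : List Int) (cur : Int) : List Int × Int :=
  if _h : t < cur then
    let p := passSub t ds cur false
    if hc : p.2.2 = true then whileSub t p.1 p.2.1
    else (p.1, p.2.1)
  else (ds, cur)
termination_by (cur - t).toNat
decreasing_by
  have := passSub_changed_lt t ds cur hc
  omega

def allocate_durations_py (shot_count : Int) (target_duration_seconds : Int) : List Int :=
  let min_total := shot_count * 3
  let max_total := shot_count * 6
  let target := max min_total (min max_total target_duration_seconds)
  let base := max 3 (min 6 (pyRoundDiv target shot_count))
  let durations := List.replicate shot_count.toNat base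
  let current := durations.sum
  let p := whileAdd target durations current
  let q := whileSub target p.1 p.2
  q.1

-- ===== PORT B =====
-- 'for i in range(k): durations[i] += step' — add step to the first k elements
def bumpFirst (step : Int) : Nat → List Int → List Int
  | 0, ds => ds
  | _ + 1, [] => []
  | k + 1, d :: rest => (d + step) :: bumpFirst step k rest

def allocate_durations_py_alt (shot_count : Int) (target_duration_seconds : Int) : List Int :=
  let min_total := shot_count * 3
  let max_total := shot_count * 6
  let target := max min_total (min max_total target_duration_seconds)
  let base := max 3 (min 6 (pyRoundDiv target shot_count))
  let durations := List.replicate shot_count.toNat base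
  let delta := target - base * shot_count
  let step : Int := if 0 < delta then 1 else -1
  bumpFirst step (min delta.natAbs durations.length) durations

-- ===== PRECONDITION & SPEC =====
-- Pre_ excludes only shot_count = 0, where both Pythons raise ZeroDivisionError in round(target / shot_count).
def Pre_allocate_durations_py (shot_count : Int) (target_duration_seconds : Int) : Prop :=
  shot_count ≠ 0
instance (shot_count : Int) (target_duration_seconds : Int) : Decidable (Pre_allocate_durations_py shot_count target_duration_seconds) := by unfold Pre_allocate_durations_py; infer_instance

def pvWitness_allocate_durations_py : Int × Int := (4, 17)

def Spec_allocate_durations_py (shot_count : Int) (target_duration_seconds : Int) (out : List Int) : Prop := out = allocate_durations_py_alt shot_count target_duration_seconds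
instance (shot_count : Int) (target_duration_seconds : Int) (out : List Int) : Decidable (Spec_allocate_durations_py shot_count target_duration_seconds out) := by unfold Spec_allocate_durations_py; infer_instance

-- ===== CLAIM (what is proved, stated in full; the proofs are below) =====
def Claim_equal_allocate_durations_py : Prop := ∀ (shot_count : Int) (target_duration_seconds : Int), Dom_allocate_durations_py shot_count target_duration_seconds → Pre_allocate_durations_py shot_count target_duration_seconds → Spec_allocate_durations_py shot_count target_duration_seconds (allocate_durations_py shot_count target_duration_seconds)

-- ===== LEMMAS AND PROOFS =====

-- round-half-even lands within half a divisor of the exact quotient (d > 0)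
theorem roundPos_close (n d : Int) (hd : 0 < d) :
    -d ≤ 2 * (n - roundHalfEvenPos n d * d) ∧ 2 * (n - roundHalfEvenPos n d * d) ≤ d := by
  have h1 := PySem.Int.floordiv_mul_add_mod n d
  have h2 := PySem.Int.mod_nonneg n hd
  have h3 := PySem.Int.mod_lt n hd
  unfold roundHalfEvenPos
  split_ifs <;> constructor <;> nlinarith

-- a full adding pass on a list of all-below-6 entries reaching the target within its length:
-- it bumps the first (t - cur) entries by one, ends at t, and reports change iff cur < t
theorem passAdd_spec (t : Int) : ∀ (ds : List Int) (cur : Int) (ch : Bool),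
    (∀ d ∈ ds, d < 6) → cur ≤ t → (t - cur).toNat ≤ ds.length →
    passAdd t ds cur ch = (bumpFirst 1 (t - cur).toNat ds, t, ch || decide (cur < t)) := by
  intro ds
  induction ds with
  | nil =>
    intro cur ch _ hle hlen
    simp only [List.length_nil, Nat.le_zero] at hlen
    have hct : cur = t := by omega
    simp [passAdd, bumpFirst, hct]
  | cons d rest ih =>
    intro cur ch hall hle hlen
    by_cases hcur : cur < t
    · have hd6 : d < 6 := hall d (by simp)
      simp only [passAdd, if_pos (show d < 6 ∧ cur < t from ⟨hd6, hcur⟩)]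
      rw [ih (cur + 1) true (fun x hx => hall x (by simp [hx])) (by omega)
            (by simp at hlen ⊢; omega)]
      have hk : (t - cur).toNat = (t - (cur + 1)).toNat + 1 := by omega
      rw [hk]
      simp [bumpFirst, hcur]
    · have hct : cur = t := by omega
      have hk : (t - cur).toNat = 0 := by omega
      simp only [passAdd, hct, lt_irrefl, and_false, if_false]
      rw [ih t ch (fun x hx => hall x (by simp [hx])) (by omega) (by simp)]
      simp [bumpFirst]

theorem passSub_spec (t : Int) : ∀ (ds : List Int) (cur : Int) (ch : Bool),
    (∀ d ∈ ds, 3 < d) → t ≤ cur → (cur - t).toNat ≤ ds.length →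
    passSub t ds cur ch = (bumpFirst (-1) (cur - t).toNat ds, t, ch || decide (t < cur)) := by
  intro ds
  induction ds with
  | nil =>
    intro cur ch _ hle hlen
    simp only [List.length_nil, Nat.le_zero] at hlen
    have hct : cur = t := by omega
    simp [passSub, bumpFirst, hct]
  | cons d rest ih =>
    intro cur ch hall hle hlen
    by_cases hcur : t < cur
    · have hd3 : 3 < d := hall d (by simp)
      simp only [passSub, if_pos (show 3 < d ∧ t < cur from ⟨hd3, hcur⟩)]
      rw [ih (cur - 1) true (fun x hx => hall x (by simp [hx])) (by omega)
            (by simp at hlen ⊢; omega)]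
      have hk : (cur - t).toNat = (cur - 1 - t).toNat + 1 := by omega
      rw [hk]
      simp [bumpFirst, hcur, sub_eq_add_neg]
    · have hct : cur = t := by omega
      have hk : (cur - t).toNat = 0 := by omega
      simp only [passSub, hct, lt_irrefl, and_false, if_false]
      rw [ih t ch (fun x hx => hall x (by simp [hx])) (by omega) (by simp)]
      simp [bumpFirst]

-- one-step unfoldings of the while loops
theorem whileAdd_stop (t : Int) (ds : List Int) (cur : Int) (h : ¬ cur < t) :
    whileAdd t ds cur = (ds, cur) := by
  rw [whileAdd]; simp [h]

theorem whileSub_stop (t : Int) (ds : List Int) (cur : Int) (h : ¬ t < cur) :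
    whileSub t ds cur = (ds, cur) := by
  rw [whileSub]; simp [h]

-- ===== VERDICT (by name: the statement is the Claim_ definition above) =====
theorem allocate_durations_py_spec : Claim_equal_allocate_durations_py := by
  intro sc t _ hne
  unfold Spec_allocate_durations_py allocate_durations_py allocate_durations_py_alt
  simp only []
  set target := max (sc * 3) (min (sc * 6) t) with htar
  set base := max 3 (min 6 (pyRoundDiv target sc)) with hbase
  rcases lt_or_gt_of_ne hne with hneg | hpos
  · -- shot_count < 0 : empty durations on both sides
    have h0 : sc.toNat = 0 := by omega
    have htneg : target < 0 := by
      have : min (sc * 6) t ≤ sc * 6 := min_le_left _ _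
      omega
    rw [h0]
    simp only [List.replicate, List.sum_nil]
    rw [whileAdd_stop target [] 0 (by omega)]
    rw [whileSub]
    simp [passSub, htneg, bumpFirst]
  · -- shot_count > 0
    have hbounds : sc * 3 ≤ target ∧ target ≤ sc * 6 := by
      constructor
      · exact le_max_left _ _
      · have h1 : min (sc * 6) t ≤ sc * 6 := min_le_left _ _
        omega
    have hq : pyRoundDiv target sc = roundHalfEvenPos target sc := by
      unfold pyRoundDiv; rw [if_neg (by omega)]
    obtain ⟨hc1, hc2⟩ := roundPos_close target sc hpos
    set q := roundHalfEvenPos target sc with hqdef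
    have hq3 : 3 ≤ q := by nlinarith
    have hq6 : q ≤ 6 := by nlinarith
    have hbq : base = q := by
      rw [hbase, hq, min_eq_right (by omega), max_eq_right (by omega)]
    have hsum : (List.replicate sc.toNat base).sum = base * sc := by
      rw [List.sum_replicate, nsmul_eq_mul]
      have : (sc.toNat : Int) = sc := by omega
      rw [this, mul_comm]
    have hlen : (List.replicate sc.toNat base).length = sc.toNat := List.length_replicate
    set ds := List.replicate sc.toNat base with hds
    set δ := target - base * sc with hδ
    have hδle : 2 * δ ≤ sc ∧ -sc ≤ 2 * δ := by rw [hδ, hbq]; omega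
    have hall6 : δ > 0 → ∀ d ∈ ds, d < 6 := by
      intro hpos' d hd
      have hb6 : base < 6 := by
        rcases lt_or_eq_of_le (show base ≤ 6 by rw [hbq]; omega) with h | h
        · exact h
        · exfalso; rw [hδ, h] at hpos'; omega
      rw [hds] at hd
      rw [List.eq_of_mem_replicate hd]; exact hb6
    have hall3 : δ < 0 → ∀ d ∈ ds, 3 < d := by
      intro hneg' d hd
      have hb3 : 3 < base := by
        rcases lt_or_eq_of_le (show 3 ≤ base by rw [hbq]; omega) with h | h
        · exact h
        · exfalso; rw [hδ, ← h] at hneg'; omega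
      rw [hds] at hd
      rw [List.eq_of_mem_replicate hd]; exact hb3
    rw [hsum]
    rcases lt_trichotomy δ 0 with hd0 | hd0 | hd0
    · -- delta < 0 : only the subtracting loop fires, one pass
      rw [whileAdd_stop target ds (base * sc) (by omega)]
      rw [whileSub]
      rw [dif_pos (show target < base * sc by omega)]
      rw [passSub_spec target ds (base * sc) false (hall3 hd0) (by omega)
            (by rw [hlen]; omega)]
      simp only [decide_eq_true_eq, Bool.false_or]
      rw [dif_pos (by omega)]
      rw [whileSub_stop target _ target (by omega)]
      have hstep : (if 0 < δ then (1:Int) else -1) = -1 := by rw [if_neg (by omega)]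
      rw [hstep]
      have hkk : min δ.natAbs ds.length = (base * sc - target).toNat := by
        rw [hlen]; omega
      rw [hkk]
    · -- delta = 0 : neither loop fires
      have hct : base * sc = target := by omega
      rw [whileAdd_stop target ds (base * sc) (by omega)]
      rw [whileSub_stop target ds (base * sc) (by omega)]
      have hkk : min δ.natAbs ds.length = 0 := by omega
      rw [hkk]
      cases ds <;> simp [bumpFirst]
    · -- delta > 0 : only the adding loop fires, one pass
      rw [whileAdd]
      rw [dif_pos (show base * sc < target by omega)]
      rw [passAdd_spec target ds (base * sc) false (hall6 hd0) (by omega)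
            (by rw [hlen]; omega)]
      simp only [decide_eq_true_eq, Bool.false_or]
      rw [dif_pos (by omega)]
      rw [whileAdd_stop target _ target (by omega)]
      rw [whileSub_stop target _ target (by omega)]
      have hstep : (if 0 < δ then (1:Int) else -1) = 1 := by rw [if_pos (by omega)]
      rw [hstep]
      have hkk : min δ.natAbs ds.length = (target - base * sc).toNat := by
        rw [hlen]; omega
      rw [hkk]
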